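-- pv_equiv track=rewrite | github.com/jasontan656/Otctopus_OS_AgentConsole | Skills/_shared/octopus_os_workflow_runtime/scripts/construction_plan_support.py | _same_parent_doc_graph
-- ===== SOURCE A (Python) =====
-- def _same_parent_doc_graph(records: dict[str, dict[str, object]], modified_refs: set[str]) -> dict[str, set[str]]:
--     graph = {doc_ref: set() for doc_ref in modified_refs}
--     parent_groups: dict[str, list[str]] = {}
--     for doc_ref in modified_refs:
--         parent_groups.setdefault(str(records[doc_ref]["parent_dir"]), []).append(doc_ref)
--     for doc_refs in parent_groups.values():
--         if len(doc_refs) < 2: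
--             continue
--         for left_ref in doc_refs:
--             graph[left_ref].update(ref for ref in doc_refs if ref != left_ref)
--     return graph
-- ===== SOURCE B (Python) =====
-- def _same_parent_doc_graph(records: dict[str, dict[str, object]], modified_refs: set[str]) -> dict[str, set[str]]:
--     return {
--         doc_ref: {
--             other
--             for other in modified_refs
--             if other != doc_ref
--             and str(records[other]["parent_dir"]) == str(records[doc_ref]["parent_dir"])
--         }
--         for doc_ref in modified_refs
--     }
-- ===== Notes on version B (the rewrite author's own statement) =====
-- stated objective: simpler
-- what changed: B replaces A's two-phase grouping (build a parent_dir->list dict, then re-scan each group of size >= 2 with an exclusion filter) by a single dict comprehension that, for each modified ref, directly collects the other refs whose parent_dir matches; no intermediate grouping structure exists.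
import Mathlib
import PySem

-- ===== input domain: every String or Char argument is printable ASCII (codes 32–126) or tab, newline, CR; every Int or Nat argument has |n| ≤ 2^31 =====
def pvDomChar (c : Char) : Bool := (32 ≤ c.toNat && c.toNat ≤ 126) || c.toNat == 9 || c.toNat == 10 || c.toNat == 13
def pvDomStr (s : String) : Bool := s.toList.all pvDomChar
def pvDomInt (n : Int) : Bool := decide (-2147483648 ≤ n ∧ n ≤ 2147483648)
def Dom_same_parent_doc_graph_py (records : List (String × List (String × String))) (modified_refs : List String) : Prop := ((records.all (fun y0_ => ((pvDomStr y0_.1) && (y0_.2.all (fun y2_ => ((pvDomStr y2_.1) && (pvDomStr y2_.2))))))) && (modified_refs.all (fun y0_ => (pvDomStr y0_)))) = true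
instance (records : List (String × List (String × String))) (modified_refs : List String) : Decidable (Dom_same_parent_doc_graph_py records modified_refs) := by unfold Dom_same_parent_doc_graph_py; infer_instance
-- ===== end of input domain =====

-- B replaces A's group-then-rescan construction by a single direct pairwise comprehension (simpler; not faster).


-- records[r]["parent_dir"] as both Pythons read it (str() is the identity on the String values of this domain);
-- Pre_ guarantees both keys are present, so getD never takes its default.
def pvParent (records : List (String × List (String × String))) (r : String) : String :=
  (PySem.Dict.mk ((PySem.Dict.mk records).getD r [])).getD "parent_dir" ""

-- ===== PORT A =====
def same_parent_doc_graph_py (records : List (String × List (String × String))) (modified_refs : List String) : List (String × List String) :=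
  -- graph = {doc_ref: set() for doc_ref in modified_refs}
  let graph : PySem.Dict String (PySem.Set String) :=
    modified_refs.foldl (fun g r => g.insert r PySem.Set.empty) PySem.Dict.empty
  -- parent_groups: setdefault(str(records[doc_ref]["parent_dir"]), []).append(doc_ref)
  let parent_groups : PySem.Dict String (List String) :=
    modified_refs.foldl
      (fun pg r => pg.modify (pvParent records r) [] (fun xs => xs ++ [r]))
      PySem.Dict.empty
  -- for doc_refs in parent_groups.values(): if len < 2: continue; graph[left].update(ref for ref in doc_refs if ref != left)
  let graph :=
    parent_groups.values.foldl
      (fun g doc_refs =>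
        if doc_refs.length < 2 then g
        else doc_refs.foldl
          (fun g left =>
            g.modify left PySem.Set.empty
              (fun s => PySem.Set.update s (doc_refs.filter (fun ref => ref != left))))
          g)
      graph
  graph.items

-- ===== PORT B =====
def same_parent_doc_graph_py_alt (records : List (String × List (String × String))) (modified_refs : List String) : List (String × List String) :=
  -- {doc_ref: {other for other in modified_refs if other != doc_ref and parent(other) == parent(doc_ref)} for doc_ref in modified_refs}
  (modified_refs.foldl
    (fun g doc_ref =>
      g.insert doc_ref
        (PySem.Set.ofList (modified_refs.filter
          (fun other => other != doc_ref && pvParent records other == pvParent records doc_ref))))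
    PySem.Dict.empty).items

-- ===== PRECONDITION & SPEC =====
-- Pre_ excludes exactly the inputs where Python A raises KeyError (a modified ref missing from records,
-- or a record without a "parent_dir" key), and requires modified_refs to hold distinct elements (it is a
-- Python set, so a list with duplicates does not represent a valid input).
def Pre_same_parent_doc_graph_py (records : List (String × List (String × String))) (modified_refs : List String) : Prop :=
  modified_refs.Nodup ∧
  ∀ r ∈ modified_refs,
    (PySem.Dict.mk records).contains r = true ∧
    (PySem.Dict.mk ((PySem.Dict.mk records).getD r [])).contains "parent_dir" = true
instance (records : List (String × List (String × String))) (modified_refs : List String) : Decidable (Pre_same_parent_doc_graph_py records modified_refs) := by unfold Pre_same_parent_doc_graph_py; infer_instance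

def pvWitness_same_parent_doc_graph_py : (List (String × List (String × String))) × List String :=
  ([("a", [("parent_dir", "p")]), ("b", [("parent_dir", "p")]), ("c", [("parent_dir", "q")])], ["a", "b", "c"])

def Spec_same_parent_doc_graph_py (records : List (String × List (String × String))) (modified_refs : List String) (out : List (String × List String)) : Prop := out = same_parent_doc_graph_py_alt records modified_refs
instance (records : List (String × List (String × String))) (modified_refs : List String) (out : List (String × List String)) : Decidable (Spec_same_parent_doc_graph_py records modified_refs out) := by unfold Spec_same_parent_doc_graph_py; infer_instance

-- ===== CLAIM (what is proved, stated in full; the proofs are below) =====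
def Claim_equal_same_parent_doc_graph_py : Prop := ∀ (records : List (String × List (String × String))) (modified_refs : List String), Dom_same_parent_doc_graph_py records modified_refs → Pre_same_parent_doc_graph_py records modified_refs → Spec_same_parent_doc_graph_py records modified_refs (same_parent_doc_graph_py records modified_refs)

-- ===== LEMMAS AND PROOFS =====

theorem pv_modify_map_items (l : List String) (hnd : l.Nodup) (w : String → List String)
    (left : String) (hm : left ∈ l) (d0 : List String) (f : List String → List String) :
    ((PySem.Dict.mk (l.map fun r => (r, w r))).modify left d0 f).items
      = l.map (fun r => (r, if r = left then f (w r) else w r)) := by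
  have hkeys : (PySem.Dict.mk (l.map fun r => (r, w r))).keys = l := by
    simp [PySem.Dict.keys, List.map_map, Function.comp_def]
  have hknd : (PySem.Dict.mk (l.map fun r => (r, w r))).keys.Nodup := by rw [hkeys]; exact hnd
  have hcontains : (PySem.Dict.mk (l.map fun r => (r, w r))).contains left = true := by
    rw [PySem.Dict.contains_iff_mem_keys, hkeys]; exact hm
  have hgetD : (PySem.Dict.mk (l.map fun r => (r, w r))).getD left d0 = w left :=
    PySem.Dict.getD_of_mem_items _ (List.mem_map_of_mem (f := fun r => (r, w r)) hm) hknd d0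
  show ((PySem.Dict.mk (l.map fun r => (r, w r))).insert left
      (f ((PySem.Dict.mk (l.map fun r => (r, w r))).getD left d0))).items = _
  rw [hgetD, PySem.Dict.items_insert_of_contains _ _ hcontains, List.map_map]
  refine List.map_congr_left (fun r _ => ?_)
  by_cases h : r = left
  · subst h; simp
  · simp [h, Function.comp, show (r == left) = false by simpa using h]

theorem pv_inner_fold (l : List String) (hnd : l.Nodup) (F : String → List String → List String) :
    ∀ (ds : List String) (w : String → List String), ds.Nodup → (∀ x ∈ ds, x ∈ l) →
    (ds.foldl (fun g left => g.modify left PySem.Set.empty (fun s => F left s))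
        (PySem.Dict.mk (l.map fun r => (r, w r)))).items
      = l.map (fun r => (r, if r ∈ ds then F r (w r) else w r)) := by
  intro ds
  induction ds with
  | nil => intro w _ _; simp
  | cons left t ih =>
    intro w hndc hsub
    have hm : left ∈ l := hsub left (by simp)
    have hlt : left ∉ t := (List.nodup_cons.mp hndc).1
    have hd1 : ((PySem.Dict.mk (l.map fun r => (r, w r))).modify left PySem.Set.empty (fun s => F left s))
        = PySem.Dict.mk (l.map fun r => (r, if r = left then F r (w r) else w r)) := by
      apply PySem.Dict.ext
      rw [pv_modify_map_items l hnd w left hm _ _]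
      refine List.map_congr_left (fun r _ => ?_)
      by_cases h : r = left <;> simp [h]
    rw [List.foldl_cons, hd1, ih _ (List.nodup_cons.mp hndc).2 (fun x hx => hsub x (by simp [hx]))]
    refine List.map_congr_left (fun r _ => ?_)
    by_cases ht : r ∈ t
    · have : r ≠ left := fun h => hlt (h ▸ ht)
      simp [ht, this]
    · by_cases he : r = left
      · subst he; simp [hlt]
      · simp [ht, he]

theorem pv_outer_fold (l : List String) (hnd : l.Nodup) (parent : String → String) :
    ∀ (gs : List (String × List String)) (w : String → List String),
    (∀ pg ∈ gs, pg.2 = l.filter (fun s => parent s == pg.1)) → (gs.map Prod.fst).Nodup →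
    ((gs.map Prod.snd).foldl
        (fun g doc_refs =>
          if doc_refs.length < 2 then g
          else doc_refs.foldl
            (fun g left =>
              g.modify left PySem.Set.empty
                (fun s => PySem.Set.update s (doc_refs.filter (fun ref => ref != left))))
            g)
        (PySem.Dict.mk (l.map fun r => (r, w r)))).items
      = l.map (fun r => (r,
          if (∃ pg ∈ gs, pg.1 = parent r) ∧ ¬ (l.filter (fun s => parent s == parent r)).length < 2
          then PySem.Set.update (w r) ((l.filter (fun s => parent s == parent r)).filter (fun ref => ref != r))
          else w r)) := by
  intro gs
  induction gs with
  | nil => intro w _ _; simp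
  | cons pg t ih =>
    obtain ⟨p, grp⟩ := pg
    intro w hg hndf
    have hgrp : grp = l.filter (fun s => parent s == p) := hg (p, grp) (by simp)
    have hpt : p ∉ t.map Prod.fst := by
      rw [List.map_cons] at hndf
      exact (List.nodup_cons.mp hndf).1
    have hext : ∀ r, r ∈ l → ((∃ pg ∈ t, pg.1 = parent r) → p ≠ parent r) := by
      rintro r _ ⟨q, hq, hq1⟩ hpp
      apply hpt
      rw [hpp, ← hq1]
      exact List.mem_map_of_mem (f := Prod.fst) hq
    by_cases hlen : grp.length < 2
    · rw [List.map_cons, List.foldl_cons, if_pos hlen,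
        ih w (fun q hq => hg q (by simp [hq])) (hndf.of_cons)]
      refine List.map_congr_left (fun r hrl => ?_)
      by_cases hp : p = parent r
      · have hfalse : ¬ (∃ pg ∈ t, pg.1 = parent r) := fun h => hext r hrl h hp
        have hlen' : (l.filter (fun s => parent s == parent r)).length < 2 := by
          rw [← hp, ← hgrp]; exact hlen
        simp [hfalse, hlen', hp]
      · have : (∃ pg ∈ (p, grp) :: t, pg.1 = parent r) ↔ (∃ pg ∈ t, pg.1 = parent r) := by
          constructor
          · rintro ⟨q, hq, hq1⟩
            rcases List.mem_cons.mp hq with h | h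
            · subst h; exact absurd hq1 hp
            · exact ⟨q, h, hq1⟩
          · rintro ⟨q, hq, hq1⟩; exact ⟨q, List.mem_cons_of_mem _ hq, hq1⟩
        simp only [this]
    · have hgnd : grp.Nodup := hgrp ▸ hnd.filter _
      have hgsub : ∀ x ∈ grp, x ∈ l := by
        intro x hx; rw [hgrp] at hx; exact (List.mem_filter.mp hx).1
      have hd1 := pv_inner_fold l hnd
        (fun left s => PySem.Set.update s (grp.filter (fun ref => ref != left))) grp w hgnd hgsub
      rw [List.map_cons, List.foldl_cons, if_neg hlen]
      have hd1' : (grp.foldl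
            (fun g left =>
              g.modify left PySem.Set.empty
                (fun s => PySem.Set.update s (grp.filter (fun ref => ref != left))))
            (PySem.Dict.mk (l.map fun r => (r, w r))))
          = PySem.Dict.mk (l.map fun r => (r,
              if r ∈ grp then PySem.Set.update (w r) (grp.filter (fun ref => ref != r)) else w r)) := by
        apply PySem.Dict.ext; exact hd1
      rw [hd1', ih _ (fun q hq => hg q (by simp [hq])) (hndf.of_cons)]
      refine List.map_congr_left (fun r hrl => ?_)
      have hmemgrp : r ∈ grp ↔ (parent r == p) = true := by
        rw [hgrp, List.mem_filter]; exact ⟨fun h => h.2, fun h => ⟨hrl, h⟩⟩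
      by_cases hp : p = parent r
      · have hrg : r ∈ grp := hmemgrp.mpr (by simp [hp])
        have hfalse : ¬ (∃ pg ∈ t, pg.1 = parent r) := fun h => hext r hrl h hp
        have hflt : l.filter (fun s => parent s == parent r) = grp := by rw [hgrp, hp]
        have hlen2 : ¬ (l.filter (fun s => parent s == parent r)).length < 2 := by
          rw [hflt]; exact hlen
        simp [hfalse, hrg, hp, hflt]
        exact fun h => absurd h (by omega)
      · have hrg : r ∉ grp := by
          intro h
          have hb : (parent r == p) = true := hmemgrp.mp h
          have hpe : parent r = p := by simpa using hb
          exact hp hpe.symm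
        have : (∃ pg ∈ (p, grp) :: t, pg.1 = parent r) ↔ (∃ pg ∈ t, pg.1 = parent r) := by
          constructor
          · rintro ⟨q, hq, hq1⟩
            rcases List.mem_cons.mp hq with h | h
            · subst h; exact absurd hq1 hp
            · exact ⟨q, h, hq1⟩
          · rintro ⟨q, hq, hq1⟩; exact ⟨q, List.mem_cons_of_mem _ hq, hq1⟩
        simp only [this, hrg, if_false]

-- ===== VERDICT (by name: the statement is the Claim_ definition above) =====
theorem same_parent_doc_graph_py_spec : Claim_equal_same_parent_doc_graph_py := by
  intro records l _ hpre
  obtain ⟨hnd, -⟩ := hpre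
  unfold Spec_same_parent_doc_graph_py same_parent_doc_graph_py same_parent_doc_graph_py_alt
  simp only []
  -- abbreviation
  set parent := pvParent records with hparent
  -- the initial graph: a map-shaped dict over l with empty values
  have hg0 : (l.foldl (fun g r => g.insert r PySem.Set.empty) PySem.Dict.empty)
      = PySem.Dict.mk (l.map fun r => (r, (PySem.Set.empty : PySem.Set String))) := by
    apply PySem.Dict.ext
    have := PySem.Dict.items_foldl_insert_fresh l (fun a => a)
      (fun _ => (PySem.Set.empty : PySem.Set String)) PySem.Dict.empty
      (fun a _ => PySem.Dict.contains_empty a) (by simpa using hnd)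
    simpa [PySem.Dict.items] using this
  -- B's dict is map-shaped too
  have hB : (l.foldl
      (fun g doc_ref => g.insert doc_ref
        (PySem.Set.ofList (l.filter
          (fun other => other != doc_ref && parent other == parent doc_ref))))
      PySem.Dict.empty).items
      = l.map (fun r => (r, PySem.Set.ofList (l.filter
          (fun other => other != r && parent other == parent r)))) := by
    have := PySem.Dict.items_foldl_insert_fresh l (fun a => a)
      (fun r => PySem.Set.ofList (l.filter (fun other => other != r && parent other == parent r)))
      PySem.Dict.empty (fun a _ => PySem.Dict.contains_empty a) (by simpa using hnd)
    simpa [PySem.Dict.items] using this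
  -- parent_groups facts
  set pgs := l.foldl (fun pg r => pg.modify (parent r) [] (fun xs => xs ++ [r])) PySem.Dict.empty
    with hpgs
  have hpg_fold : pgs = (l.map (fun r => (parent r, r))).foldl
      (fun d q => d.modify q.1 [] (fun xs => xs ++ [q.2])) PySem.Dict.empty := by
    rw [hpgs, List.foldl_map]
  have hknd : pgs.keys.Nodup := by
    rw [hpgs]
    exact PySem.Dict.nodup_keys_foldl_modify_key l parent [] (fun _ r xs => xs ++ [r])
      PySem.Dict.empty PySem.Dict.nodup_keys_empty
  have hgetD : ∀ p, pgs.getD p [] = l.filter (fun s => parent s == p) := by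
    intro p
    rw [hpg_fold, PySem.Dict.getD_foldl_modify_append]
    simp [List.filter_map, List.map_map, Function.comp_def]
  have hitems : ∀ pg ∈ pgs.items, pg.2 = l.filter (fun s => parent s == pg.1) := by
    rintro ⟨p, grp⟩ hmem
    have := PySem.Dict.getD_of_mem_items pgs hmem hknd []
    rw [← this, hgetD p]
  have hkeys : pgs.keys = PySem.Set.ofList (l.map parent) := by
    rw [hpgs]
    have := PySem.Dict.keys_foldl_modify_key l parent [] (fun _ r xs => xs ++ [r]) PySem.Dict.empty
    simpa [PySem.Dict.keys_empty] using this
  have hfstnd : (pgs.items.map Prod.fst).Nodup := hknd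
  -- the third loop, via the outer-fold lemma
  rw [hg0]
  have hvals : pgs.values = pgs.items.map Prod.snd := rfl
  rw [hvals, pv_outer_fold l hnd parent pgs.items (fun _ => PySem.Set.empty) hitems hfstnd, hB]
  -- pointwise comparison of the two value maps
  refine List.map_congr_left (fun r hrl => ?_)
  have hBF : l.filter (fun other => other != r && parent other == parent r)
      = (l.filter (fun s => parent s == parent r)).filter (fun ref => ref != r) := by
    rw [List.filter_filter]
  have hex : ∃ pg ∈ pgs.items, pg.1 = parent r := by
    have hmemk : parent r ∈ pgs.keys := by
      rw [hkeys]
      exact (PySem.Set.mem_ofList _ _).mpr (List.mem_map_of_mem hrl)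
    obtain ⟨q, hq, hq1⟩ := List.mem_map.mp hmemk
    exact ⟨q, hq, hq1⟩
  by_cases hlen : (l.filter (fun s => parent s == parent r)).length < 2
  · -- the group is a singleton {r}: both sides are the empty set
    have hrin : r ∈ l.filter (fun s => parent s == parent r) := by
      simp [List.mem_filter, hrl]
    have hone : l.filter (fun s => parent s == parent r) = [r] := by
      have h1 : (l.filter (fun s => parent s == parent r)).length = 1 := by
        have := List.length_pos_of_mem hrin; omega
      obtain ⟨x, hx⟩ := List.length_eq_one_iff.mp h1
      rw [hx] at hrin ⊢
      simp at hrin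
      rw [hrin]
    simp only [hBF, hone]
    simp [PySem.Set.ofList, PySem.Set.empty]
  · simp only [hex, hlen, not_false_iff, and_true, if_true, hBF]
    rfl
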